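-- pv_equiv track=rewrite | github.com/ChimeraMetta/Chimera | executors/full_analyzer.py | find_call_chains
-- ===== SOURCE A (Python) =====
-- def find_call_chains(call_relationships, min_length=3):
--     """Find significant call chains in the codebase."""
--     chains = []
--
--     def dfs(current, path, visited):
--         """Depth-first search to find call chains."""
--         if current in visited:
--             return
--
--         new_path = path + [current]
--         visited.add(current)
--
--         if len(new_path) >= min_length:
--             chains.append(new_path)
--
--         for callee in call_relationships.get(current, []):
--             dfs(callee, new_path, visited.copy())
--
--     # Start DFS from each function
--     for caller in call_relationships:
--         dfs(caller, [], set())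
--
--     # Sort chains by length (longest first)
--     return sorted(chains, key=len, reverse=True)
-- ===== SOURCE B (Python) =====
-- def find_call_chains(call_relationships, min_length=3):
--     """Find significant call chains by breadth-first levels (all chains of one
--     length at a time); emitting the levels longest-first makes the final sort
--     unnecessary, because a stable length-descending sort of the depth-first
--     output is exactly the levels in reverse order."""
--     levels = []
--     frontier = [(caller, [caller]) for caller in call_relationships]
--     k = 1
--     while frontier:
--         if k >= min_length:
--             levels.append([path for _, path in frontier])
--         nxt = []
--         for last, path in frontier:
--             for callee in call_relationships.get(last, []):
--                 if callee not in path: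
--                     nxt.append((callee, path + [callee]))
--         frontier = nxt
--         k += 1
--     result = []
--     for level in reversed(levels):
--         result.extend(level)
--     return result
-- ===== Notes on version B (the rewrite author's own statement) =====
-- stated objective: alternative
-- what changed: A's recursive per-start DFS followed by a stable sort is replaced by a breadth-first level iteration that generates all chains of each length at once and outputs the levels longest-first, so no sort is performed at all.
import Mathlib
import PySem

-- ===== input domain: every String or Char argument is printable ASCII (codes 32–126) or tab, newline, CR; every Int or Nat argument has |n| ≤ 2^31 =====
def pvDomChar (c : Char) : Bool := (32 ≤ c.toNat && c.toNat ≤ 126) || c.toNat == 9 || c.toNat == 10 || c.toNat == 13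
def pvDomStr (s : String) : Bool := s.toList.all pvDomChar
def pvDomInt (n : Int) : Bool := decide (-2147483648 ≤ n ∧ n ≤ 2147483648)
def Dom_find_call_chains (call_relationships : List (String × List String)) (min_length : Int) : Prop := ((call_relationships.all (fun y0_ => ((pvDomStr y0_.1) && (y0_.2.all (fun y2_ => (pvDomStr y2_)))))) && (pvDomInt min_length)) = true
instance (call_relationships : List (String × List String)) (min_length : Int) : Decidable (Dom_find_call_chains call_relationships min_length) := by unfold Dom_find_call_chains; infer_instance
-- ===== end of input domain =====

-- B replaces A's recursive DFS + final stable sort by a breadth-first iteration over levels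
-- (all chains of one length at a time), emitted longest level first, with no sort at all;
-- alternative algorithm, same asymptotic cost.

-- ===== termination helpers (cited by the ports' decreasing_by) =====

/-- All strings that can ever be a `current` of the search: the keys and all callees. -/
def pvUniv (crs : List (String × List String)) : List String :=
  crs.map Prod.fst ++ (crs.map Prod.snd).flatten

/-- How many universe elements are not yet visited. -/
def pvFree (crs : List (String × List String)) (visited : List String) : Nat :=
  ((pvUniv crs).dedup.filter (fun s => !(PySem.Set.contains visited s))).length

/-- Weight of a search state with visited set `v`. -/
def pvWeight (crs : List (String × List String)) (v : List String) : Nat :=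
  ((pvUniv crs).length + 1) ^ (pvFree crs v)

theorem pv_lookup_mem_keys {crs : List (String × List String)} {k : String} {l : List String}
    (h : crs.lookup k = some l) : k ∈ crs.map Prod.fst := by
  induction crs with
  | nil => simp [List.lookup] at h
  | cons e t ih =>
    by_cases hk : k = e.1
    · simp [hk]
    · rw [List.lookup] at h
      simp only [show (k == e.1) = false by simp [hk]] at h
      exact List.mem_cons_of_mem _ (ih h)

theorem pv_lookup_mem_vals {crs : List (String × List String)} {k : String} {l : List String}
    (h : crs.lookup k = some l) : l ∈ crs.map Prod.snd := by
  induction crs with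
  | nil => simp [List.lookup] at h
  | cons e t ih =>
    by_cases hk : k = e.1
    · rw [List.lookup] at h
      simp only [show (k == e.1) = true by simp [hk]] at h
      simp [← Option.some.inj h]
    · rw [List.lookup] at h
      simp only [show (k == e.1) = false by simp [hk]] at h
      exact List.mem_cons_of_mem _ (ih h)

theorem pv_filter_le {α : Type} (l : List α) (p q : α → Bool)
    (himp : ∀ a, q a = true → p a = true) :
    (l.filter q).length ≤ (l.filter p).length := by
  induction l with
  | nil => simp
  | cons a t ih =>
    by_cases hq : q a = true
    · simp [List.filter, hq, himp a hq]; omega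
    · simp only [Bool.not_eq_true] at hq
      by_cases hp : p a = true <;> simp [List.filter, hq, hp] <;> omega

theorem pv_filter_lt {α : Type} (l : List α) (p q : α → Bool) (x : α)
    (hx : x ∈ l) (hpx : p x = true) (hqx : q x = false)
    (himp : ∀ a, q a = true → p a = true) :
    (l.filter q).length < (l.filter p).length := by
  induction l with
  | nil => cases hx
  | cons a t ih =>
    rcases List.mem_cons.1 hx with rfl | hx'
    · simp only [List.filter, hpx, hqx]
      have := pv_filter_le t p q himp
      simp; omega
    · have ht := ih hx'
      by_cases hq : q a = true
      · simp [List.filter, hq, himp a hq]; omega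
      · simp only [Bool.not_eq_true] at hq
        by_cases hp : p a = true <;> simp [List.filter, hq, hp] <;> omega

theorem pv_free_lt {crs : List (String × List String)} {current : String}
    {visited : PySem.Set String}
    (hu : current ∈ pvUniv crs) (hnm : current ∉ visited) :
    pvFree crs (PySem.Set.add visited current) < pvFree crs visited := by
  unfold pvFree
  apply pv_filter_lt _ _ _ current (List.mem_dedup.2 hu)
  · simp [hnm]
  · have hmemadd : current ∈ PySem.Set.add visited current := (PySem.Set.mem_add _ _ _).2 (Or.inr rfl)
    simp [hmemadd]
  · intro a ha
    by_cases hca : a ∈ visited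
    · exfalso
      have hmemadd : a ∈ PySem.Set.add visited current := (PySem.Set.mem_add _ _ _).2 (Or.inl hca)
      simp [hmemadd] at ha
    · simp [hca]

theorem pv_weight_pos (crs : List (String × List String)) (v : List String) :
    0 < pvWeight crs v := Nat.pow_pos (Nat.succ_pos _)

theorem pv_free_append_lt {crs : List (String × List String)} {c : String} {v : List String}
    (hu : c ∈ pvUniv crs) (hnm : c ∉ v) :
    pvFree crs (v ++ [c]) < pvFree crs v := by
  have hadd : PySem.Set.add v c = v ++ [c] := by
    simp [PySem.Set.add, PySem.Set.contains, hnm]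
  rw [← hadd]
  exact pv_free_lt hu hnm

/-- One successor frame of a BFS frame: the callees of the last element that are not on the path,
each extending the path. -/
def pvChildren (crs : List (String × List String)) (g : String × List String) :
    List (String × List String) :=
  ((crs.lookup g.1).getD []).filterMap (fun callee =>
    if callee ∈ g.2 then none else some (callee, g.2 ++ [callee]))

theorem pv_mem_children {crs : List (String × List String)} {g h : String × List String}
    (hm : h ∈ pvChildren crs g) :
    h.1 ∈ pvUniv crs ∧ h.1 ∉ g.2 ∧ h.2 = g.2 ++ [h.1] := by
  unfold pvChildren at hm
  obtain ⟨c, hcl, heq⟩ := List.mem_filterMap.1 hm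
  by_cases hc : c ∈ g.2
  · simp [hc] at heq
  · rw [if_neg hc] at heq
    obtain rfl := Option.some.inj heq
    refine ⟨?_, hc, rfl⟩
    rcases hl : crs.lookup g.1 with _ | l
    · rw [hl] at hcl; cases hcl
    · rw [hl] at hcl
      simp only [Option.getD_some] at hcl
      unfold pvUniv
      exact List.mem_append_right _ (List.mem_flatten.2 ⟨l, pv_lookup_mem_vals hl, hcl⟩)

/-- Measure of a whole BFS frontier. -/
def pvSMB (crs : List (String × List String)) (frontier : List (String × List String)) : Nat :=
  (frontier.map (fun g => pvWeight crs g.2)).sum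

theorem pv_sum_flatMap {α β : Type} (l : List α) (f : α → List β) (w : β → Nat) :
    ((l.flatMap f).map w).sum = (l.map (fun a => ((f a).map w).sum)).sum := by
  induction l with
  | nil => simp
  | cons a t ih => simp [List.flatMap_cons, ih]

theorem pv_sum_lt_sum {α : Type} (F : List α) (f g : α → Nat)
    (h : ∀ x ∈ F, f x < g x) (hne : F ≠ []) : (F.map f).sum < (F.map g).sum := by
  cases F with
  | nil => cases hne rfl
  | cons a t =>
    have h1 : f a < g a := h a (List.mem_cons_self ..)
    have h2 : (t.map f).sum ≤ (t.map g).sum :=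
      List.sum_le_sum (fun x hx => le_of_lt (h x (List.mem_cons_of_mem _ hx)))
    simp only [List.map_cons, List.sum_cons]
    omega

theorem pv_frame_lt (crs : List (String × List String)) (g : String × List String) :
    ((pvChildren crs g).map (fun h => pvWeight crs h.2)).sum < pvWeight crs g.2 := by
  by_cases hch : pvChildren crs g = []
  · simp [hch, pv_weight_pos]
  · obtain ⟨h0, hh0⟩ := List.exists_mem_of_ne_nil _ hch
    obtain ⟨hu0, hn0, he0⟩ := pv_mem_children hh0
    have hfree1 : 1 ≤ pvFree crs g.2 := by
      have := pv_free_append_lt hu0 hn0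
      omega
    set L := (pvUniv crs).length with hL
    set W := (L + 1) ^ (pvFree crs g.2 - 1) with hW
    have hWpos : 0 < W := Nat.pow_pos (Nat.succ_pos _)
    have hbound : ∀ x ∈ (pvChildren crs g).map (fun h => pvWeight crs h.2), x ≤ W := by
      intro x hx
      obtain ⟨h, hh, rfl⟩ := List.mem_map.1 hx
      obtain ⟨hu, hn, he⟩ := pv_mem_children hh
      have hlt : pvFree crs h.2 < pvFree crs g.2 := by
        rw [he]; exact pv_free_append_lt hu hn
      unfold pvWeight
      exact Nat.pow_le_pow_right (Nat.succ_le_succ (Nat.zero_le _)) (by omega)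
    have hsum : ((pvChildren crs g).map (fun h => pvWeight crs h.2)).sum ≤
        ((pvChildren crs g).map (fun h => pvWeight crs h.2)).length • W :=
      List.sum_le_card_nsmul _ _ hbound
    have hlen : (pvChildren crs g).length ≤ L := by
      unfold pvChildren
      rcases hl : crs.lookup g.1 with _ | l
      · simp
      · simp only [Option.getD_some]
        refine le_trans (List.length_filterMap_le _ _) ?_
        have h2 : l.length ≤ ((crs.map Prod.snd).map List.length).sum :=
          List.single_le_sum (fun _ _ => Nat.zero_le _) _
            (List.mem_map_of_mem (pv_lookup_mem_vals hl))
        have h4 : ((crs.map Prod.snd).map List.length).sum ≤ L := by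
          rw [hL]; unfold pvUniv
          rw [List.length_append, List.length_flatten]; omega
        exact le_trans h2 h4
    have hstep : ((pvChildren crs g).map (fun h => pvWeight crs h.2)).sum ≤ L * W := by
      rw [List.length_map] at hsum
      calc ((pvChildren crs g).map (fun h => pvWeight crs h.2)).sum
          ≤ (pvChildren crs g).length • W := hsum
        _ = (pvChildren crs g).length * W := by rw [smul_eq_mul]
        _ ≤ L * W := Nat.mul_le_mul_right _ hlen
    have hfin : L * W < pvWeight crs g.2 := by
      unfold pvWeight
      have : (L + 1) ^ pvFree crs g.2 = (L + 1) ^ (pvFree crs g.2 - 1) * (L + 1) := by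
        rw [← pow_succ]
        congr 1
        omega
      rw [← hL, this, ← hW]
      nlinarith [hWpos]
    omega

theorem pv_step_lt (crs : List (String × List String))
    (frontier : List (String × List String)) (h : frontier ≠ []) :
    pvSMB crs (frontier.flatMap (fun fr =>
      ((crs.lookup fr.1).getD []).filterMap (fun callee =>
        if callee ∈ fr.2 then none else some (callee, fr.2 ++ [callee])))) <
      pvSMB crs frontier := by
  unfold pvSMB
  rw [show (frontier.flatMap (fun fr =>
      ((crs.lookup fr.1).getD []).filterMap (fun callee =>
        if callee ∈ fr.2 then none else some (callee, fr.2 ++ [callee])))) =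
      frontier.flatMap (pvChildren crs) from rfl]
  rw [pv_sum_flatMap]
  exact pv_sum_lt_sum _ _ _ (fun g _ => pv_frame_lt crs g) h

-- ===== PORT A =====

/-- A's inner recursive `dfs`; it returns the chains it appends, in order. -/
def find_call_chains_dfs (call_relationships : List (String × List String)) (min_length : Int)
    (current : String) (path : List String) (visited : PySem.Set String) : List (List String) :=
  if PySem.Set.contains visited current then []
  else
    -- new_path = path + [current]; visited' = visited ∪ {current} (Set.add, written inline)
    (if min_length ≤ ((path ++ [current]).length : Int) then [path ++ [current]] else []) ++
      ((call_relationships.lookup current).getD []).attach.flatMap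
        (fun callee =>
          find_call_chains_dfs call_relationships min_length callee.1 (path ++ [current])
            (PySem.Set.add visited current))
termination_by pvFree call_relationships visited
decreasing_by
  rename_i hnot
  have hnm : current ∉ visited := by simpa using hnot
  obtain ⟨c, hc⟩ := callee
  refine pv_free_lt ?_ hnm
  rcases h : call_relationships.lookup current with _ | ch
  · rw [h] at hc; cases hc
  · unfold pvUniv
    exact List.mem_append_left _ (pv_lookup_mem_keys h)

def find_call_chains (call_relationships : List (String × List String)) (min_length : Int) :
    List (List String) :=
  PySem.List.sorted
    (call_relationships.foldl
      (fun chains caller =>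
        chains ++ find_call_chains_dfs call_relationships min_length caller.1 [] PySem.Set.empty)
      [])
    (fun c => c.length) true

-- ===== PORT B =====

/-- B's while loop: collect the list of levels (one per chain length `k`, in increasing order);
`frontier` holds frames `(last, path)`. -/
def find_call_chains_alt_loop (call_relationships : List (String × List String)) (min_length : Int)
    (frontier : List (String × List String)) (k : Int)
    (levels : List (List (List String))) : List (List (List String)) :=
  if h : frontier = [] then levels
  else
    find_call_chains_alt_loop call_relationships min_length
      (frontier.flatMap (fun fr =>
        ((call_relationships.lookup fr.1).getD []).filterMap (fun callee =>
          if callee ∈ fr.2 then none else some (callee, fr.2 ++ [callee]))))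
      (k + 1)
      (if min_length ≤ k then levels ++ [frontier.map (fun fr => fr.2)] else levels)
termination_by pvSMB call_relationships frontier
decreasing_by
  refine lt_of_le_of_lt (le_of_eq ?_) (pv_step_lt call_relationships frontier h)
  congr 1
  exact (List.flatMap_subtype fun x hx => rfl).trans (by rw [List.unattach_attach])

def find_call_chains_alt (call_relationships : List (String × List String)) (min_length : Int) :
    List (List String) :=
  -- 'for level in reversed(levels): result.extend(level)'
  ((find_call_chains_alt_loop call_relationships min_length
      (call_relationships.map (fun caller => (caller.1, [caller.1]))) 1 []).reverse).flatten

-- ===== PRECONDITION & SPEC =====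
def Spec_find_call_chains (call_relationships : List (String × List String)) (min_length : Int) (out : List (List String)) : Prop := out = find_call_chains_alt call_relationships min_length
instance (call_relationships : List (String × List String)) (min_length : Int) (out : List (List String)) : Decidable (Spec_find_call_chains call_relationships min_length out) := by unfold Spec_find_call_chains; infer_instance

-- ===== CLAIM (what is proved, stated in full; the proofs are below) =====
def Claim_equal_find_call_chains : Prop := ∀ (call_relationships : List (String × List String)) (min_length : Int), Dom_find_call_chains call_relationships min_length → Spec_find_call_chains call_relationships min_length (find_call_chains call_relationships min_length)

-- ===== LEMMAS AND PROOFS =====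

/-- The chains A's dfs emits from one (unvisited-so-far) frame, phrased on B-style frames
`(last, full path)`. -/
def pvEmit (crs : List (String × List String)) (ml : Int) (g : String × List String) :
    List (List String) :=
  (if ml ≤ (g.2.length : Int) then [g.2] else []) ++
    (pvChildren crs g).attach.flatMap (fun hc => pvEmit crs ml hc.1)
termination_by pvFree crs g.2
decreasing_by
  obtain ⟨h', hh⟩ := hc
  obtain ⟨hu, hn, he⟩ := pv_mem_children hh
  simp only
  rw [he]
  exact pv_free_append_lt hu hn

theorem pv_filterMap_flatMap {α β γ : Type} (l : List α) (f0 : α → Option β) (f : β → List γ) :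
    (l.filterMap f0).flatMap f = l.flatMap (fun a => ((f0 a).map f).getD []) := by
  induction l with
  | nil => rfl
  | cons a t ih =>
    rcases h : f0 a with _ | b <;>
      simp [h, List.flatMap_cons, ih]

theorem pv_emit_unfold (crs : List (String × List String)) (ml : Int) (g : String × List String) :
    pvEmit crs ml g =
      (if ml ≤ (g.2.length : Int) then [g.2] else []) ++
        (pvChildren crs g).flatMap (pvEmit crs ml) := by
  rw [pvEmit]
  congr 1
  exact List.flatMap_subtype (fun x h => rfl)
    |>.trans (by rw [List.unattach_attach])

theorem pv_emit_len (crs : List (String × List String)) (ml : Int) :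
    ∀ (n : Nat) (g : String × List String), pvFree crs g.2 ≤ n →
      ∀ ch ∈ pvEmit crs ml g, g.2.length ≤ ch.length := by
  intro n
  induction n with
  | zero =>
    intro g hfree ch hch
    rw [pv_emit_unfold] at hch
    rcases List.mem_append.1 hch with h1 | h2
    · split at h1
      · rw [List.mem_singleton] at h1; subst h1; exact le_rfl
      · cases h1
    · obtain ⟨h, hh, hch'⟩ := List.mem_flatMap.1 h2
      obtain ⟨hu, hn, he⟩ := pv_mem_children hh
      exfalso
      have := pv_free_append_lt hu hn
      omega
  | succ m ih =>
    intro g hfree ch hch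
    rw [pv_emit_unfold] at hch
    rcases List.mem_append.1 hch with h1 | h2
    · split at h1
      · rw [List.mem_singleton] at h1; subst h1; exact le_rfl
      · cases h1
    · obtain ⟨h, hh, hch'⟩ := List.mem_flatMap.1 h2
      obtain ⟨hu, hn, he⟩ := pv_mem_children hh
      have hlt : pvFree crs h.2 < pvFree crs g.2 := by
        rw [he]; exact pv_free_append_lt hu hn
      have := ih h (by omega) ch hch'
      rw [he] at this
      simp at this
      omega

/-- A's dfs with visited = the path so far equals pvEmit of the corresponding frame. -/
theorem pv_dfs_eq_emit (crs : List (String × List String)) (ml : Int) :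
    ∀ (n : Nat) (current : String) (path : List String), pvFree crs path ≤ n →
      current ∉ path →
      find_call_chains_dfs crs ml current path path = pvEmit crs ml (current, path ++ [current]) := by
  intro n
  induction n with
  | zero =>
    intro current path hfree hnm
    rw [find_call_chains_dfs, pv_emit_unfold]
    rw [if_neg (by simpa [PySem.Set.contains] using hnm)]
    congr 1
    rcases hl : crs.lookup current with _ | l
    · simp [hl, pvChildren]
    · exfalso
      have hu : current ∈ pvUniv crs := by
        unfold pvUniv
        exact List.mem_append_left _ (pv_lookup_mem_keys hl)
      have hadd : PySem.Set.add path current = path ++ [current] := by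
        simp [PySem.Set.add, PySem.Set.contains, hnm]
      have := pv_free_append_lt hu hnm
      omega
  | succ m ih =>
    intro current path hfree hnm
    rw [find_call_chains_dfs, pv_emit_unfold]
    rw [if_neg (by simpa [PySem.Set.contains] using hnm)]
    congr 1
    have hadd : PySem.Set.add path current = path ++ [current] := by
      simp [PySem.Set.add, PySem.Set.contains, hnm]
    rw [hadd]
    have hattach : (((crs.lookup current).getD []).attach.flatMap
        (fun callee => find_call_chains_dfs crs ml callee.1 (path ++ [current]) (path ++ [current]))) =
        ((crs.lookup current).getD []).flatMap
          (fun callee => find_call_chains_dfs crs ml callee (path ++ [current]) (path ++ [current])) := by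
      exact List.flatMap_subtype (fun x h => rfl)
        |>.trans (by rw [List.unattach_attach])
    rw [hattach]
    unfold pvChildren
    rw [pv_filterMap_flatMap]
    rcases hl : crs.lookup current with _ | l
    · simp
    · simp only [Option.getD_some]
      have hu : current ∈ pvUniv crs := by
        unfold pvUniv
        exact List.mem_append_left _ (pv_lookup_mem_keys hl)
      have hlt := pv_free_append_lt hu hnm
      apply List.flatMap_congr
      intro c hc
      by_cases hcp : c ∈ path ++ [current]
      · rw [if_pos hcp]
        rw [find_call_chains_dfs,
          if_pos (by simpa [PySem.Set.contains] using hcp)]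
        simp
      · rw [if_neg hcp]
        simp only [Option.map_some, Option.getD_some]
        exact ih c (path ++ [current]) (by omega) hcp

-- stable-sort split: a reverse (descending) sort of a list whose keys are all ≥ k is the
-- sort of the part with key > k followed by the part with key = k, in original order.

theorem pv_insertBy_append_of_before {α : Type} (bef : α → α → Bool) (x : α) (l r : List α)
    (h : ∀ y ∈ r, bef x y = true) :
    PySem.List.insertBy bef x (l ++ r) = PySem.List.insertBy bef x l ++ r := by
  induction l with
  | nil =>
    cases r with
    | nil => rfl
    | cons a r' =>
      simp only [List.nil_append]
      rw [PySem.List.insertBy.eq_2, if_pos (h a (List.mem_cons_self ..))]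
      rfl
  | cons a l' ih =>
    by_cases hb : bef x a = true
    · simp only [List.cons_append]
      rw [PySem.List.insertBy.eq_2, if_pos hb, PySem.List.insertBy.eq_2, if_pos hb]
      simp
    · simp only [List.cons_append]
      rw [PySem.List.insertBy.eq_2, if_neg hb, PySem.List.insertBy.eq_2, if_neg hb]
      simp [ih]

theorem pv_sorted_rev_append_singleton {α : Type} (key : α → Nat) (C : List α) (x : α) :
    PySem.List.sorted (C ++ [x]) key true =
      PySem.List.insertBy (fun a b => decide (key b < key a)) x (PySem.List.sorted C key true) := by
  rw [PySem.List.sorted_rev_eq_foldl_insertBy, PySem.List.sorted_rev_eq_foldl_insertBy,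
    List.foldl_append]
  rfl

theorem pv_sorted_split {α : Type} (key : α → Nat) (k : Nat) :
    ∀ (C : List α), (∀ c ∈ C, k ≤ key c) →
      PySem.List.sorted C key true =
        PySem.List.sorted (C.filter (fun c => decide (k < key c))) key true ++
          C.filter (fun c => decide (key c = k)) := by
  intro C
  induction C using List.reverseRecOn with
  | nil => intro _; simp [PySem.List.sorted]
  | append_singleton C x ih =>
    intro hall
    have hC : ∀ c ∈ C, k ≤ key c := fun c hc => hall c (List.mem_append_left _ hc)
    have hx : k ≤ key x := hall x (List.mem_append_right _ (List.mem_cons_self ..))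
    rw [pv_sorted_rev_append_singleton, ih hC, List.filter_append, List.filter_append]
    by_cases hxe : key x = k
    · have hgt : (List.filter (fun c => decide (k < key c)) [x]) = [] := by
        simp [hxe]
      have heq : (List.filter (fun c => decide (key c = k)) [x]) = [x] := by
        simp [hxe]
      rw [hgt, heq, List.append_nil]
      rw [PySem.List.insertBy_of_forall_not_before]
      · simp
      · intro y hy
        rcases List.mem_append.1 hy with h1 | h2
        · have : y ∈ C.filter (fun c => decide (k < key c)) :=
            (PySem.List.mem_sorted _ _ _ _).1 h1
          have hky : k < key y := by
            have := List.of_mem_filter this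
            simpa using this
          simp only [decide_eq_false_iff_not]
          omega
        · have hky : key y = k := by
            have := List.of_mem_filter h2
            simpa using this
          simp only [decide_eq_false_iff_not]
          omega
    · have hxk : k < key x := by omega
      have hgt : (List.filter (fun c => decide (k < key c)) [x]) = [x] := by
        simp [hxk]
      have heq : (List.filter (fun c => decide (key c = k)) [x]) = [] := by
        simp [hxe]
      rw [hgt, heq, List.append_nil]
      rw [pv_insertBy_append_of_before]
      · rw [pv_sorted_rev_append_singleton]
      · intro y hy
        have hky : key y = k := by
          have := List.of_mem_filter hy
          simpa using this
        simp only [decide_eq_true_eq]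
        omega

-- level lemmas

theorem pv_flatMap_if_singleton {α β : Type} (l : List α) (c : Prop) [Decidable c]
    (f : α → β) :
    l.flatMap (fun a => if c then [f a] else []) = if c then l.map f else [] := by
  induction l with
  | nil => split <;> rfl
  | cons a t ih => split <;> simp_all

theorem pv_filter_level_eq (crs : List (String × List String)) (ml : Int) (k : Nat)
    (F : List (String × List String)) (hF : ∀ g ∈ F, g.2.length = k) :
    (F.flatMap (pvEmit crs ml)).filter (fun ch => decide (ch.length = k)) =
      if ml ≤ (k : Int) then F.map (fun g => g.2) else [] := by
  rw [List.filter_flatMap]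
  have hone : ∀ g ∈ F, (pvEmit crs ml g).filter (fun ch => decide (ch.length = k)) =
      if ml ≤ (k : Int) then [g.2] else [] := by
    intro g hg
    rw [pv_emit_unfold, List.filter_append]
    have hhd : ((if ml ≤ (g.2.length : Int) then [g.2] else []).filter
        (fun ch => decide (ch.length = k))) = if ml ≤ (k : Int) then [g.2] else [] := by
      rw [hF g hg]
      split <;> simp [hF g hg]
    have hch : (((pvChildren crs g).flatMap (pvEmit crs ml)).filter
        (fun ch => decide (ch.length = k))) = [] := by
      rw [List.filter_eq_nil_iff]
      intro ch hch
      obtain ⟨h, hh, hch'⟩ := List.mem_flatMap.1 hch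
      obtain ⟨hu, hn, he⟩ := pv_mem_children hh
      have := pv_emit_len crs ml (pvFree crs h.2) h le_rfl ch hch'
      rw [he] at this
      simp only [List.length_append, List.length_cons, List.length_nil] at this
      have hg2 := hF g hg
      simp only [decide_eq_true_eq]
      omega
    rw [hhd, hch, List.append_nil]
  rw [List.flatMap_congr hone, pv_flatMap_if_singleton]

theorem pv_filter_level_gt (crs : List (String × List String)) (ml : Int) (k : Nat)
    (F : List (String × List String)) (hF : ∀ g ∈ F, g.2.length = k) :
    (F.flatMap (pvEmit crs ml)).filter (fun ch => decide (k < ch.length)) =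
      (F.flatMap (pvChildren crs)).flatMap (pvEmit crs ml) := by
  rw [List.filter_flatMap, List.flatMap_assoc]
  apply List.flatMap_congr
  intro g hg
  rw [pv_emit_unfold, List.filter_append]
  have hhd : ((if ml ≤ (g.2.length : Int) then [g.2] else []).filter
      (fun ch => decide (k < ch.length))) = [] := by
    split <;> simp [hF g hg]
  have hch : (((pvChildren crs g).flatMap (pvEmit crs ml)).filter
      (fun ch => decide (k < ch.length))) = (pvChildren crs g).flatMap (pvEmit crs ml) := by
    rw [List.filter_eq_self]
    intro ch hc
    obtain ⟨h, hh, hch'⟩ := List.mem_flatMap.1 hc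
    obtain ⟨hu, hn, he⟩ := pv_mem_children hh
    have := pv_emit_len crs ml (pvFree crs h.2) h le_rfl ch hch'
    rw [he] at this
    simp only [List.length_append, List.length_cons, List.length_nil] at this
    have hg2 := hF g hg
    simp only [decide_eq_true_eq]
    omega
  rw [hhd, hch, List.nil_append]

theorem pv_loop_nil (crs : List (String × List String)) (ml : Int) (k : Int)
    (levels : List (List (List String))) :
    find_call_chains_alt_loop crs ml [] k levels = levels := by
  rw [find_call_chains_alt_loop.eq_def]
  simp

theorem pv_loop_ne (crs : List (String × List String)) (ml : Int)
    (F : List (String × List String)) (k : Int) (levels : List (List (List String)))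
    (hF : F ≠ []) :
    find_call_chains_alt_loop crs ml F k levels =
      find_call_chains_alt_loop crs ml (F.flatMap (pvChildren crs)) (k + 1)
        (if ml ≤ k then levels ++ [F.map (fun fr => fr.2)] else levels) := by
  rw [find_call_chains_alt_loop.eq_def, dif_neg hF]
  rfl

theorem pv_loop_append (crs : List (String × List String)) (ml : Int) :
    ∀ (n : Nat) (F : List (String × List String)) (k : Int)
      (levels : List (List (List String))), pvSMB crs F ≤ n →
      find_call_chains_alt_loop crs ml F k levels =
        levels ++ find_call_chains_alt_loop crs ml F k [] := by
  intro n
  induction n with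
  | zero =>
    intro F k levels hm
    cases F with
    | nil => rw [pv_loop_nil, pv_loop_nil]; simp
    | cons a t =>
      exfalso
      have := pv_weight_pos crs a.2
      unfold pvSMB at hm
      simp only [List.map_cons, List.sum_cons] at hm
      omega
  | succ m ih =>
    intro F k levels hm
    by_cases hF : F = []
    · subst hF
      rw [pv_loop_nil, pv_loop_nil]; simp
    · rw [pv_loop_ne crs ml F k levels hF, pv_loop_ne crs ml F k [] hF]
      have hlt : pvSMB crs (F.flatMap (pvChildren crs)) < pvSMB crs F := pv_step_lt crs F hF
      rw [ih _ _ _ (by omega), ih _ _ (if ml ≤ k then [] ++ [F.map (fun fr => fr.2)] else []) (by omega)]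
      split <;> simp

theorem pv_main_level (crs : List (String × List String)) (ml : Int) :
    ∀ (n : Nat) (F : List (String × List String)) (k : Nat), pvSMB crs F ≤ n →
      (∀ g ∈ F, g.2.length = k) →
      PySem.List.sorted (F.flatMap (pvEmit crs ml)) (fun c => c.length) true =
        ((find_call_chains_alt_loop crs ml F (k : Int) []).reverse).flatten := by
  intro n
  induction n with
  | zero =>
    intro F k hm hF
    cases F with
    | nil => rw [pv_loop_nil]; simp [PySem.List.sorted]
    | cons a t =>
      exfalso
      have := pv_weight_pos crs a.2
      unfold pvSMB at hm
      simp only [List.map_cons, List.sum_cons] at hm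
      omega
  | succ m ih =>
    intro F k hm hF
    by_cases hFe : F = []
    · subst hFe
      rw [pv_loop_nil]; simp [PySem.List.sorted]
    · have hall : ∀ c ∈ F.flatMap (pvEmit crs ml), k ≤ c.length := by
        intro c hc
        obtain ⟨g, hg, hc'⟩ := List.mem_flatMap.1 hc
        have := pv_emit_len crs ml (pvFree crs g.2) g le_rfl c hc'
        rw [hF g hg] at this
        exact this
      rw [pv_sorted_split _ k _ hall, pv_filter_level_gt crs ml k F hF,
        pv_filter_level_eq crs ml k F hF]
      have hstep : ∀ g ∈ F.flatMap (pvChildren crs), g.2.length = k + 1 := by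
        intro g hg
        obtain ⟨g0, hg0, hgc⟩ := List.mem_flatMap.1 hg
        obtain ⟨hu, hn, he⟩ := pv_mem_children hgc
        rw [he]
        simp [hF g0 hg0]
      have hlt : pvSMB crs (F.flatMap (pvChildren crs)) < pvSMB crs F := pv_step_lt crs F hFe
      have hrec := ih (F.flatMap (pvChildren crs)) (k + 1) (by omega) hstep
      rw [pv_loop_ne crs ml F (k : Int) [] hFe]
      rw [pv_loop_append crs ml (pvSMB crs (F.flatMap (pvChildren crs))) _ _ _ le_rfl]
      rw [List.reverse_append, List.flatten_append]
      have hcast : ((k : Int) + 1) = ((k + 1 : Nat) : Int) := by push_cast; ring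
      rw [hcast, ← hrec]
      split <;> simp

theorem pv_main (crs : List (String × List String)) (ml : Int) :
    find_call_chains crs ml = find_call_chains_alt crs ml := by
  unfold find_call_chains find_call_chains_alt
  rw [PySem.List.foldl_append_eq_flatMap]
  have hempty : (PySem.Set.empty : PySem.Set String) = ([] : List String) := rfl
  have hdfs : ∀ e ∈ crs, find_call_chains_dfs crs ml e.1 [] PySem.Set.empty =
      pvEmit crs ml (e.1, [e.1]) := by
    intro e _
    rw [hempty]
    have := pv_dfs_eq_emit crs ml (pvFree crs []) e.1 [] le_rfl (by simp)
    simpa using this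
  rw [List.flatMap_congr hdfs]
  have hmap : (crs.flatMap (fun e => pvEmit crs ml (e.1, [e.1]))) =
      ((crs.map (fun caller => (caller.1, [caller.1]))).flatMap (pvEmit crs ml)) := by
    rw [List.flatMap_map]
  rw [List.nil_append, hmap]
  have h1 : ((1 : Nat) : Int) = (1 : Int) := by norm_num
  rw [← h1]
  exact pv_main_level crs ml _ _ 1 le_rfl (by
    intro g hg
    obtain ⟨e, he, rfl⟩ := List.mem_map.1 hg
    rfl)

-- ===== VERDICT (by name: the statement is the Claim_ definition above) =====
theorem find_call_chains_spec : Claim_equal_find_call_chains := by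
  intro crs ml _
  unfold Spec_find_call_chains
  exact pv_main crs ml
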